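-- pv_equiv track=rewrite | github.com/Rebeccayazbeck/Intro_to_Object_Oriented_Programming-CSC243 | Untitled-1.py | deff
-- ===== SOURCE A (Python) =====
-- def deff(var, line_list, i):
--   signs = ["+","-","*","/","%","(",")"]
--   if not (var.isdigit() or var in signs or var == "'" or var == '"'):
--     count = 0
--     for j in range (i-1,-1,-1):
--       for var in line_list[j]:
--         if deff(var,line_list,j):
--           count+=1
--     if count == 0 :
--         return False
--   return True
-- ===== SOURCE B (Python) =====
-- def deff(var, line_list, i):
--     # A's recursion collapses: a non-literal token validates iff any of the
--     # first i lines contains a digit/sign/quote character.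
--     trivial = {"+", "-", "*", "/", "%", "(", ")", "'", '"'}
--     if var.isdigit() or var in trivial:
--         return True
--     return any(c.isdigit() or c in trivial
--                for line in line_list[:max(i, 0)] for c in line)
-- ===== Notes on version B (the rewrite author's own statement) =====
-- stated objective: simpler
-- what changed: Replaced A's mutual recursion over all earlier lines by the closed form it computes: a non-literal token validates iff some character of the first i lines is a digit/sign/quote, found in one linear scan.
import Mathlib
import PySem

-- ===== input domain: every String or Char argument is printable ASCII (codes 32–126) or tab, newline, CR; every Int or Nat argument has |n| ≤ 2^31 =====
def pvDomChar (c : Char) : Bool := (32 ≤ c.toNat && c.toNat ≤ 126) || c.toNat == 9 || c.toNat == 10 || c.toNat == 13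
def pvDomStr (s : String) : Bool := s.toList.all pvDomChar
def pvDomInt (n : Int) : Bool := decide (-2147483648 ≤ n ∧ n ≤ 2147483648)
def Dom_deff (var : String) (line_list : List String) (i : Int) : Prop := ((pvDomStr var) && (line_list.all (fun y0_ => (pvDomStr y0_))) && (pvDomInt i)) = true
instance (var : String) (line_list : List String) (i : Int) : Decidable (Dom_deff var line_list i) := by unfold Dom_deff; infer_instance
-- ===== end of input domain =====

-- B replaces A's mutual recursion over all earlier lines by the one-pass closed form it computes
-- (a non-literal token validates iff some char of the first i lines is a digit/sign/quote): simpler.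

-- ===== PORT A =====
-- literal transliteration of A; line_list[j] is pyGet? (getD "" is unreachable inside Pre_,
-- where Python would raise IndexError instead)
def deff (var : String) (line_list : List String) (i : Int) : Bool :=
  -- signs = ["+","-","*","/","%","(",")"], inlined at its use sites
  if !(PySem.Str.strIsdigit var || (["+", "-", "*", "/", "%", "(", ")"] : List String).contains var
        || var == "'" || var == "\"") then
    let count : Nat :=
      (PySem.List.pyRange (i - 1) (-1) (-1)).attach.foldl (fun count j =>
        (((PySem.List.pyGet? line_list j.1).getD "").toList).foldl (fun count c =>
          if deff (String.ofList [c]) line_list j.1 then count + 1 else count) count) 0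
    if count == 0 then false else true
  else true
termination_by i.toNat
decreasing_by
  have h := j.2
  rw [PySem.List.mem_pyRange_neg_one] at h
  omega

-- ===== PORT B =====
def deff_alt (var : String) (line_list : List String) (i : Int) : Bool :=
  -- trivial = {...}, inlined at its use sites
  if PySem.Str.strIsdigit var || (["+", "-", "*", "/", "%", "(", ")", "'", "\""] : List String).contains var then true
  else
    (PySem.List.slice line_list (some 0) (some (max i 0))).any (fun line =>
      line.toList.any (fun c =>
        PySem.Str.strIsdigit (String.ofList [c])
          || (["+", "-", "*", "/", "%", "(", ")", "'", "\""] : List String).contains (String.ofList [c])))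

-- ===== PRECONDITION & SPEC =====
-- Pre_ excludes exactly the inputs where Python A raises IndexError:
-- a non-literal var together with i > len(line_list).
def Pre_deff (var : String) (line_list : List String) (i : Int) : Prop :=
  (PySem.Str.strIsdigit var
    || (["+", "-", "*", "/", "%", "(", ")", "'", "\""] : List String).contains var) = true
  ∨ i ≤ (line_list.length : Int)
instance (var : String) (line_list : List String) (i : Int) : Decidable (Pre_deff var line_list i) := by unfold Pre_deff; infer_instance
def pvWitness_deff : String × List String × Int := ("x", ["1+"], 1)

def Spec_deff (var : String) (line_list : List String) (i : Int) (out : Bool) : Prop := out = deff_alt var line_list i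
instance (var : String) (line_list : List String) (i : Int) (out : Bool) : Decidable (Spec_deff var line_list i out) := by unfold Spec_deff; infer_instance

-- ===== CLAIM (what is proved, stated in full; the proofs are below) =====
def Claim_equal_deff : Prop := ∀ (var : String) (line_list : List String) (i : Int), Dom_deff var line_list i → Pre_deff var line_list i → Spec_deff var line_list i (deff var line_list i)
-- ===== LEMMAS AND PROOFS =====

-- the character/token test both ports use, as one boolean
def pvTriv (s : String) : Bool :=
  PySem.Str.strIsdigit s
    || (["+", "-", "*", "/", "%", "(", ")", "'", "\""] : List String).contains s

theorem pvTriv_eq_A (s : String) :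
    (PySem.Str.strIsdigit s || (["+", "-", "*", "/", "%", "(", ")"] : List String).contains s
      || s == "'" || s == "\"") = pvTriv s := by
  rw [Bool.eq_iff_iff]
  simp only [pvTriv, Bool.or_eq_true, List.contains_eq_mem, List.mem_cons,
    List.not_mem_nil, or_false, decide_eq_true_eq, beq_iff_eq]
  tauto

-- folding the attach (termination bookkeeping) away from A's counting loop
theorem pv_attach_deff (L : List String) (js : List Int) (a : Nat) :
    js.attach.foldl (fun count j =>
      (((PySem.List.pyGet? L j.1).getD "").toList).foldl (fun count c =>
        if deff (String.ofList [c]) L j.1 = true then count + 1 else count) count) a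
    = js.foldl (fun count j =>
      (((PySem.List.pyGet? L j).getD "").toList).foldl (fun count c =>
        if deff (String.ofList [c]) L j = true then count + 1 else count) count) a := by
  induction js generalizing a with
  | nil => rfl
  | cons x xs ih => simp only [List.attach_cons, List.foldl_cons, List.foldl_map]; exact ih _

-- the inner counting loop is nonzero iff some char passes
theorem pv_count_inner (cs : List Char) (p : Char → Bool) (a : Nat) :
    (cs.foldl (fun count c => if p c then count + 1 else count) a ≠ 0)
      ↔ (a ≠ 0 ∨ ∃ c ∈ cs, p c = true) := by
  induction cs generalizing a with
  | nil => simp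
  | cons c cs ih =>
    simp only [List.foldl_cons, ih]
    by_cases h : p c = true <;> simp [h]

-- the whole nested counting loop is nonzero iff some (j, char) pair passes
theorem pv_count_loop (js : List Int) (lineOf : Int → List Char) (g : Int → Char → Bool) (a : Nat) :
    (js.foldl (fun count j =>
        (lineOf j).foldl (fun count c => if g j c then count + 1 else count) count) a ≠ 0)
      ↔ (a ≠ 0 ∨ ∃ j ∈ js, ∃ c ∈ lineOf j, g j c = true) := by
  induction js generalizing a with
  | nil => simp
  | cons j js ih =>
    simp only [List.foldl_cons, ih, pv_count_inner, List.exists_mem_cons_iff]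
    exact or_assoc

-- characterisation of port B for a non-literal token
theorem deff_alt_char (var : String) (L : List String) (i : Int) (h : pvTriv var = false) :
    deff_alt var L i
      = (L.take (max i 0).toNat).any (fun line => line.toList.any (fun c => pvTriv (String.ofList [c]))) := by
  unfold deff_alt
  rw [show (PySem.Str.strIsdigit var
      || (["+", "-", "*", "/", "%", "(", ")", "'", "\""] : List String).contains var) = pvTriv var from rfl, h]
  simp only [Bool.false_eq_true, if_false, PySem.List.slice_zero_start]
  rw [PySem.List.slice_to _ (by omega : (0:Int) ≤ max i 0)]
  rfl

theorem deff_alt_true (var : String) (L : List String) (i : Int) (h : pvTriv var = true) :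
    deff_alt var L i = true := by
  unfold deff_alt
  rw [show (PySem.Str.strIsdigit var
      || (["+", "-", "*", "/", "%", "(", ")", "'", "\""] : List String).contains var) = pvTriv var from rfl, h]
  simp

theorem deff_true (var : String) (L : List String) (i : Int) (h : pvTriv var = true) :
    deff var L i = true := by
  rw [deff, pvTriv_eq_A, h]
  simp

-- main equivalence, by strong induction on i.toNat
theorem pv_main : ∀ (n : Nat) (var : String) (L : List String) (i : Int), i.toNat ≤ n →
    Pre_deff var L i → deff var L i = deff_alt var L i := by
  intro n
  induction n with
  | zero =>
    intro var L i hi _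
    by_cases h : pvTriv var = true
    · rw [deff_true var L i h, deff_alt_true var L i h]
    · replace h : pvTriv var = false := by revert h; cases pvTriv var <;> simp
      rw [deff, pvTriv_eq_A, h]
      rw [deff_alt_char var L i h]
      rw [PySem.List.pyRange_neg_one_eq_nil (by omega : i - 1 ≤ -1)]
      have h0 : (max i 0).toNat = 0 := by omega
      simp [h0]
  | succ n ih =>
    intro var L i hi hpre
    by_cases h : pvTriv var = true
    · rw [deff_true var L i h, deff_alt_true var L i h]
    · replace h : pvTriv var = false := by revert h; cases pvTriv var <;> simp
      have hlen : i ≤ (L.length : Int) := by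
        rcases hpre with hp | hp
        · simp only [pvTriv] at h
          rw [h] at hp
          simp at hp
        · exact hp
      rw [deff, pvTriv_eq_A, h]
      rw [deff_alt_char var L i h]
      simp only [Bool.not_false, if_true]
      rw [pv_attach_deff]
      rcases Classical.em ((PySem.List.pyRange (i - 1) (-1) (-1)).foldl (fun count j =>
          (((PySem.List.pyGet? L j).getD "").toList).foldl (fun count c =>
            if deff (String.ofList [c]) L j then count + 1 else count) count) 0 = 0) with hz | hz
      · -- count = 0: no (j,c) passes, so no line among the first i has a trivial char
        rw [hz]
        simp only [beq_self_eq_true, if_true]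
        have hno : ¬ ∃ j ∈ PySem.List.pyRange (i - 1) (-1) (-1),
            ∃ c ∈ ((PySem.List.pyGet? L j).getD "").toList, deff (String.ofList [c]) L j = true := by
          intro hex
          exact absurd ((pv_count_loop _ _ _ 0).2 (Or.inr hex)) (by simpa using hz)
        symm
        rw [List.any_eq_false]
        intro line hline hIn
        rw [List.any_eq_true] at hIn
        obtain ⟨c, hc, hcT⟩ := hIn
        rw [List.mem_take_iff_getElem] at hline
        obtain ⟨k, hk, hkeq⟩ := hline
        apply hno
        have hklen : k < L.length := by omega
        refine ⟨(k : Int), ?_, c, ?_, ?_⟩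
        · rw [PySem.List.mem_pyRange_neg_one]
          constructor <;> omega
        · rw [PySem.List.pyGet?_natCast]
          simp only [List.getElem?_eq_getElem hklen, Option.getD_some]
          rw [← hkeq] at hc
          exact hc
        · have hjle : ((k : Int)).toNat ≤ n := by omega
          rw [ih (String.ofList [c]) L k hjle (Or.inl hcT)]
          exact deff_alt_true _ L k hcT
      · -- count ≠ 0: some (j,c) passes, so some line among the first i has a trivial char
        have hex := (pv_count_loop (PySem.List.pyRange (i - 1) (-1) (-1))
            (fun j => ((PySem.List.pyGet? L j).getD "").toList)
            (fun j c => deff (String.ofList [c]) L j) 0).1 hz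
        rcases hex with h0 | ⟨j, hj, c, hc, hdc⟩
        · omega
        rw [PySem.List.mem_pyRange_neg_one] at hj
        have hjlen : j.toNat < L.length := by omega
        have hline : (PySem.List.pyGet? L j).getD "" = L[j.toNat] := by
          rw [PySem.List.pyGet?_eq_some_getElem L (by omega) (by omega : j < (L.length : Int))]
          rfl
        rw [hline] at hc
        have hIH := ih (String.ofList [c]) L j (by omega) (Or.inr (by omega))
        rw [hIH] at hdc
        have hzf : ((PySem.List.pyRange (i - 1) (-1) (-1)).foldl (fun count j =>
            (((PySem.List.pyGet? L j).getD "").toList).foldl (fun count c =>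
              if deff (String.ofList [c]) L j then count + 1 else count) count) 0 == 0) = false := by
          simpa using hz
        rw [hzf]
        simp only [Bool.false_eq_true, if_false]
        symm
        rw [List.any_eq_true]
        by_cases hcT : pvTriv (String.ofList [c]) = true
        · refine ⟨L[j.toNat], ?_, ?_⟩
          · rw [List.mem_take_iff_getElem]
            exact ⟨j.toNat, by omega, rfl⟩
          · rw [List.any_eq_true]
            exact ⟨c, hc, hcT⟩
        · replace hcT : pvTriv (String.ofList [c]) = false := by
            revert hcT; cases pvTriv (String.ofList [c]) <;> simp
          rw [deff_alt_char _ L j hcT] at hdc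
          rw [List.any_eq_true] at hdc
          obtain ⟨line, hlm, hla⟩ := hdc
          refine ⟨line, ?_, hla⟩
          have htt : L.take (max j 0).toNat = (L.take (max i 0).toNat).take (max j 0).toNat := by
            rw [List.take_take]
            congr 1
            omega
          rw [htt] at hlm
          exact List.mem_of_mem_take hlm

-- ===== VERDICT (by name: the statement is the Claim_ definition above) =====
theorem deff_spec : Claim_equal_deff := by
  intro var L i _ hpre
  unfold Spec_deff
  exact pv_main i.toNat var L i le_rfl hpre
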